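-- pv_equiv track=rewrite | github.com/KeyranT/Hytale-PlayerFinder-playerBase | player_logic.py | extract_dynamic_interesting_fields
-- ===== SOURCE A (Python) =====
-- def extract_dynamic_interesting_fields(flat_data):
--     keywords = [
--         "level", "lvl", "xp", "experience", "exp", "health", "mana", "stamina",
--         "signature", "reputation", "achievement", "zone", "position", "death",
--         "combo", "rank", "skill", "stat", "inventory", "armor", "hotbar",
--         "tool", "utility", "backpack", "memory", "objective", "instance",
--     ]
--
--     results = []
--     for key, value in flat_data.items():
--         key_lower = key.lower()
--         if any(word in key_lower for word in keywords):
--             results.append((key, value))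
--     return results
-- ===== SOURCE B (Python) =====
-- def extract_dynamic_interesting_fields(flat_data):
--     keywords = [
--         "level", "lvl", "xp", "experience", "exp", "health", "mana", "stamina",
--         "signature", "reputation", "achievement", "zone", "position", "death",
--         "combo", "rank", "skill", "stat", "inventory", "armor", "hotbar",
--         "tool", "utility", "backpack", "memory", "objective", "instance",
--     ]
--     buckets = {}
--     for w in keywords:
--         buckets.setdefault(w[0], []).append(w)
--
--     def hit(k):
--         for i in range(len(k)):
--             for w in buckets.get(k[i], ()):
--                 if k.startswith(w, i):
--                     return True
--         return False
--
--     return [(key, value) for key, value in flat_data.items() if hit(key.lower())]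
-- ===== Notes on version B (the rewrite author's own statement) =====
-- stated objective: alternative
-- what changed: B replaces the per-key 'any(word in key_lower)' 27 independent substring searches by a single left-to-right scan of each key that dispatches through a precomputed first-character bucket dict of the keywords, and builds the result with a comprehension filter instead of an accumulator loop.
import Mathlib
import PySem

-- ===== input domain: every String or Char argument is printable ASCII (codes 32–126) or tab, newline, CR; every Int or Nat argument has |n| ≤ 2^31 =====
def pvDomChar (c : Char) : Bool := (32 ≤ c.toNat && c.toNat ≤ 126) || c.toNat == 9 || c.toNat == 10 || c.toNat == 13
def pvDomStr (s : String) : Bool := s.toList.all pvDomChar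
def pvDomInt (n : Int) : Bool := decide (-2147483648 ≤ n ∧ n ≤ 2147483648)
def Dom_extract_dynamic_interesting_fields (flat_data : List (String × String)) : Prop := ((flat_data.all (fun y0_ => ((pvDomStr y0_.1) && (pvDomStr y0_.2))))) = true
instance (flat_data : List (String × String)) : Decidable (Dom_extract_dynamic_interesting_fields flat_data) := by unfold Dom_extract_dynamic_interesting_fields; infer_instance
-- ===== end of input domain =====

-- B replaces A's 27 per-key substring searches by one positional scan of each key dispatching
-- through a first-character bucket dict of the keywords (objective: alternative; not faster).

-- ===== PORT A =====
-- the keyword list shared by both Pythons (a literal in each)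
def pvKeywords : List String :=
  ["level", "lvl", "xp", "experience", "exp", "health", "mana", "stamina",
   "signature", "reputation", "achievement", "zone", "position", "death",
   "combo", "rank", "skill", "stat", "inventory", "armor", "hotbar",
   "tool", "utility", "backpack", "memory", "objective", "instance"]

-- for key, value in flat_data.items(): if any(word in key.lower() for word in keywords): results.append((key, value))
def extract_dynamic_interesting_fields (flat_data : List (String × String)) : List (String × String) :=
  (PySem.Dict.ofList flat_data).items.foldl
    (fun results kv =>
      let key_lower := PySem.Str.lower kv.1
      if pvKeywords.any (fun word => PySem.Str.isIn word key_lower) then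
        results ++ [(kv.1, kv.2)]
      else results)
    []

-- ===== PORT B =====
-- buckets = {}; for w in keywords: buckets.setdefault(w[0], []).append(w)
-- (every keyword is nonempty, so w[0] is its head character; headD is exact here)
def pvBuckets : PySem.Dict Char (List String) :=
  pvKeywords.foldl (fun d w => d.modify (w.toList.headD ' ') [] (· ++ [w])) PySem.Dict.empty

-- def hit(k): for i in range(len(k)): for w in buckets.get(k[i], ()): if k.startswith(w, i): return True
-- (k[i] is exact: i < len(k); k.startswith(w, i) with 0 ≤ i ≤ len(k) is startswith on k.drop i)
def pvHit (k : List Char) : Bool :=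
  (List.range k.length).any (fun i =>
    (pvBuckets.getD (k.getD i ' ') []).any (fun w =>
      PySem.Chars.startswith (k.drop i) w.toList))

-- [(key, value) for key, value in flat_data.items() if hit(key.lower())]
def extract_dynamic_interesting_fields_alt (flat_data : List (String × String)) : List (String × String) :=
  (PySem.Dict.ofList flat_data).items.filter (fun kv => pvHit (PySem.Str.lower kv.1).toList)

-- ===== PRECONDITION & SPEC =====
def Spec_extract_dynamic_interesting_fields (flat_data : List (String × String)) (out : List (String × String)) : Prop := out = extract_dynamic_interesting_fields_alt flat_data
instance (flat_data : List (String × String)) (out : List (String × String)) : Decidable (Spec_extract_dynamic_interesting_fields flat_data out) := by unfold Spec_extract_dynamic_interesting_fields; infer_instance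

-- ===== CLAIM (what is proved, stated in full; the proofs are below) =====
def Claim_equal_extract_dynamic_interesting_fields : Prop := ∀ (flat_data : List (String × String)), Dom_extract_dynamic_interesting_fields flat_data → Spec_extract_dynamic_interesting_fields flat_data (extract_dynamic_interesting_fields flat_data)

-- ===== LEMMAS AND PROOFS =====

-- bucket lookup returns exactly the keywords whose first character is c
lemma pvBuckets_getD (c : Char) :
    pvBuckets.getD c [] = pvKeywords.filter (fun w => w.toList.headD ' ' == c) := by
  have h : pvBuckets
      = (pvKeywords.map (fun w => (w.toList.headD ' ', w))).foldl
          (fun d p => d.modify p.1 [] (· ++ [p.2])) PySem.Dict.empty := by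
    rw [List.foldl_map]; rfl
  rw [h, PySem.Dict.getD_foldl_modify_append, PySem.Dict.getD_empty]
  simp [List.filter_map, List.map_map, Function.comp_def]

lemma pvKeywords_ne_nil : ∀ w ∈ pvKeywords, w.toList ≠ [] := by decide

-- the positional bucket scan equals the per-keyword substring test
lemma pvHit_eq (k : List Char) :
    pvHit k = pvKeywords.any (fun word => PySem.Chars.isIn word.toList k) := by
  rw [Bool.eq_iff_iff]
  simp only [pvHit, List.any_eq_true, List.mem_range, pvBuckets_getD, List.mem_filter,
    PySem.Chars.startswith_iff, PySem.Chars.isIn_iff_infix]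
  constructor
  · rintro ⟨i, _, w, ⟨hw, _⟩, hpre⟩
    obtain ⟨t, ht⟩ := hpre
    exact ⟨w, hw, k.take i, t, by rw [List.append_assoc, ht, List.take_append_drop]⟩
  · rintro ⟨w, hw, s, t, rfl⟩
    have hne := pvKeywords_ne_nil w hw
    obtain ⟨c, rest, wl⟩ := List.exists_cons_of_ne_nil hne
    have hdrop : ((s ++ w.toList ++ t).drop s.length) = w.toList ++ t := by
      rw [List.append_assoc]; simp
    refine ⟨s.length, ?_, w, ⟨hw, ?_⟩, ?_⟩
    · rw [wl]; simp
    · rw [List.getD_eq_getElem?_getD, ← List.head?_drop, hdrop, wl]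
      simp
    · rw [hdrop]
      exact List.prefix_append _ _

-- ===== VERDICT (by name: the statement is the Claim_ definition above) =====
theorem extract_dynamic_interesting_fields_spec : Claim_equal_extract_dynamic_interesting_fields := by
  intro flat_data _
  unfold Spec_extract_dynamic_interesting_fields extract_dynamic_interesting_fields
    extract_dynamic_interesting_fields_alt
  rw [show (fun (results : List (String × String)) kv =>
        let key_lower := PySem.Str.lower kv.1
        if pvKeywords.any (fun word => PySem.Str.isIn word key_lower) then
          results ++ [(kv.1, kv.2)]
        else results)
      = (fun results kv =>
        if (fun kv : String × String =>
            pvKeywords.any (fun word => PySem.Str.isIn word (PySem.Str.lower kv.1))) kv then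
          results ++ [kv]
        else results) from by funext results kv; simp,
    PySem.List.foldl_append_if_eq_filter]
  simp only [List.nil_append]
  apply List.filter_congr
  intro kv _
  simp [pvHit_eq, PySem.Str.isIn_eq]
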